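-- pv_equiv track=rewrite | github.com/pclumson1/Python3_Algorithms | removeaDigit.py | removeOneDigit
-- ===== SOURCE A (Python) =====
-- def removeOneDigit(s, t):
--     counter = 0
--
--     for i, c in enumerate(s):
--         if ord(c) < 97:
--             c = list(s)
--             c.pop(i)
--             if "".join(c) < t:
--                 counter += 1
--
--     for i, c in enumerate(t):
--         if ord(c) < 97:
--             c = list(t)
--             c.pop(i)
--             if "".join(c) > s:
--                 counter += 1
--
--     return counter
-- ===== SOURCE B (Python) =====
-- def _cmpDel(x, y, L, k, i):
--     # three-way comparison of x-without-char-i against y, using precomputed LCPs: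
--     # L = lcp(x, y), k = lcp(x[i+1:], y[i:])
--     n, m = len(x), len(y)
--     if i <= L:
--         p, q = i + 1 + k, i + k
--         if p >= n and q >= m:
--             return 0
--         if p >= n:
--             return -1
--         if q >= m:
--             return 1
--         return -1 if x[p] < y[q] else 1
--     if L >= m:
--         return 1
--     return -1 if x[L] < y[L] else 1
--
--
-- def _countDeletions(x, y, want):
--     # number of indices i with ord(x[i]) < 97 whose deletion makes x compare to y as `want`
--     n, m = len(x), len(y)
--     L = 0
--     while L < n and L < m and x[L] == y[L]:
--         L += 1
--     suf = [0] * (n + 1)          # suf[i] = lcp(x[i+1:], y[i:])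
--     for i in range(n - 1, -1, -1):
--         if i + 1 < n and i < m and x[i + 1] == y[i]:
--             suf[i] = suf[i + 1] + 1
--     total = 0
--     for i in range(n):
--         if ord(x[i]) < 97 and _cmpDel(x, y, L, suf[i], i) == want:
--             total += 1
--     return total
--
--
-- def removeOneDigit(s, t):
--     return _countDeletions(s, t, -1) + _countDeletions(t, s, 1)
-- ===== Notes on version B (the rewrite author's own statement) =====
-- stated objective: alternative
-- what changed: Instead of materialising each deleted-character copy and comparing it to the other string (a fresh O(n) list build + compare per candidate index, O(n^2) worst case), B precomputes the prefix LCP of the two strings plus a right-to-left table of shifted-suffix LCPs and resolves every deletion comparison in O(1), for O(n+m) total; on inputs with few characters below 'a' both are linear and A's lighter constant wins, so no speed is claimed.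
import Mathlib
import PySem

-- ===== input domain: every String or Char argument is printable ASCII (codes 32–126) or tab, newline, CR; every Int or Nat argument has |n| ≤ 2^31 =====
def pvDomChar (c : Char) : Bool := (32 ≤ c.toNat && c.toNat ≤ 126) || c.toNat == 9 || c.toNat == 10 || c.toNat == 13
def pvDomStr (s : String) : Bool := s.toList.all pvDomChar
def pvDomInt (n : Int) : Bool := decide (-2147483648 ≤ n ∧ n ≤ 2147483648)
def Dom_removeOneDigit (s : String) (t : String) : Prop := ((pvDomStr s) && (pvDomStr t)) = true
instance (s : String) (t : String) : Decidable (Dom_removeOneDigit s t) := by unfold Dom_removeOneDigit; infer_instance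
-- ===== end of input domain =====

-- B replaces A's build-a-copy-and-compare per deletion with a single LCP precomputation
-- (prefix LCP plus a right-to-left shifted-suffix LCP table) resolving each deletion comparison in O(1); objective: alternative.

-- ===== PORT A =====
def removeOneDigit (s : String) (t : String) : Int :=
  let ss := s.toList
  let tt := t.toList
  let c1 : Int := (PySem.List.enumerate ss 0).foldl (fun counter ic =>
    if ic.2.toNat < 97 then
      match PySem.List.pop? ss ic.1 with
      | some (_, rest) => if rest < tt then counter + 1 else counter
      | none => counter
    else counter) 0
  (PySem.List.enumerate tt 0).foldl (fun counter ic =>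
    if ic.2.toNat < 97 then
      match PySem.List.pop? tt ic.1 with
      | some (_, rest) => if ss < rest then counter + 1 else counter
      | none => counter
    else counter) c1

-- ===== PORT B =====
-- length of the longest common prefix (Source B's `while` scan)
def pvLcp : List Char → List Char → Nat
  | a :: as, b :: bs => if a = b then pvLcp as bs + 1 else 0
  | _, _ => 0

-- Source B's right-to-left fill of suf: (pvSuf x y).getD i 0 = lcp(x[i+1:], y[i:])
def pvSuf : List Char → List Char → List Nat
  | [], _ => []
  | _ :: as, ys =>
    let rest := pvSuf as ys.tail
    (match as, ys with
     | b :: _, c :: _ => if b = c then rest.headD 0 + 1 else 0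
     | _, _ => 0) :: rest

-- Source B's _cmpDel: O(1) three-way comparison of x-without-index-i against y
def pvCmpDel (x y : List Char) (L k i : Nat) : Int :=
  let n := x.length
  let m := y.length
  if i ≤ L then
    let p := i + 1 + k
    let q := i + k
    if n ≤ p ∧ m ≤ q then 0
    else if n ≤ p then -1
    else if m ≤ q then 1
    else if x.getD p ' ' < y.getD q ' ' then -1 else 1
  else if m ≤ L then 1
  else if x.getD L ' ' < y.getD L ' ' then -1 else 1

-- Source B's _countDeletions
def pvCountDel (x y : List Char) (want : Int) : Int :=
  let L := pvLcp x y
  let suf := pvSuf x y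
  (List.range x.length).foldl (fun total i =>
    if (x.getD i ' ').toNat < 97 ∧ pvCmpDel x y L (suf.getD i 0) i = want then total + 1
    else total) 0

def removeOneDigit_alt (s : String) (t : String) : Int :=
  pvCountDel s.toList t.toList (-1) + pvCountDel t.toList s.toList 1

-- ===== PRECONDITION & SPEC =====
def Spec_removeOneDigit (s : String) (t : String) (out : Int) : Prop := out = removeOneDigit_alt s t
instance (s : String) (t : String) (out : Int) : Decidable (Spec_removeOneDigit s t out) := by unfold Spec_removeOneDigit; infer_instance

-- ===== CLAIM (what is proved, stated in full; the proofs are below) =====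
def Claim_equal_removeOneDigit : Prop := ∀ (s : String) (t : String), Dom_removeOneDigit s t → Spec_removeOneDigit s t (removeOneDigit s t)

-- ===== LEMMAS AND PROOFS =====

-- three-way lexicographic comparison, the specification both sides are reduced to
def ordCmp : List Char → List Char → Int
  | [], [] => 0
  | [], _ :: _ => -1
  | _ :: _, [] => 1
  | a :: u, b :: v => if a < b then -1 else if b < a then 1 else ordCmp u v

theorem ordCmp_eq_neg_one_iff (u : List Char) : ∀ v, ordCmp u v = -1 ↔ u < v := by
  induction u with
  | nil => intro v; cases v with
    | nil => simp [ordCmp]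
    | cons c cs => simp [ordCmp, List.nil_lt_cons]
  | cons a u ih =>
    intro v; cases v with
    | nil => simp [ordCmp, List.not_lt_nil]
    | cons b vs =>
      rcases lt_trichotomy a b with h | h | h
      · simp [ordCmp, h, List.cons_lt_cons_iff]
      · subst h; simp [ordCmp, ih]
      · have h1 : ¬ a < b := lt_asymm h
        have h2 : a ≠ b := (ne_of_lt h).symm
        simp [ordCmp, h, h1, h2, List.cons_lt_cons_iff]

theorem ordCmp_eq_one_iff (u : List Char) : ∀ v, ordCmp u v = 1 ↔ v < u := by
  induction u with
  | nil => intro v; cases v with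
    | nil => simp [ordCmp]
    | cons c cs => simp [ordCmp]
  | cons a u ih =>
    intro v; cases v with
    | nil => simp [ordCmp, List.nil_lt_cons]
    | cons b vs =>
      rcases lt_trichotomy a b with h | h | h
      · have h1 : ¬ b < a := lt_asymm h
        have h2 : b ≠ a := (ne_of_lt h).symm
        simp [ordCmp, h, h1, h2, List.cons_lt_cons_iff]
      · subst h; simp [ordCmp, ih]
      · have h1 : ¬ a < b := lt_asymm h
        simp [ordCmp, h, h1, List.cons_lt_cons_iff]

theorem pvLcp_le_right (a : List Char) : ∀ b : List Char, pvLcp a b ≤ b.length := by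
  induction a with
  | nil => intro b; cases b <;> simp [pvLcp]
  | cons x as ih => intro b; cases b with
    | nil => simp [pvLcp]
    | cons y bs => by_cases h : x = y <;> simp [pvLcp, h]; exact ih bs
theorem pvLcp_take (a : List Char) : ∀ b : List Char, a.take (pvLcp a b) = b.take (pvLcp a b) := by
  induction a with
  | nil => intro b; cases b <;> simp [pvLcp]
  | cons x as ih => intro b; cases b with
    | nil => simp [pvLcp]
    | cons y bs => by_cases h : x = y <;> simp [pvLcp, h]; exact ih bs
theorem pvLcp_take_of_le (a b : List Char) (k : Nat) (hk : k ≤ pvLcp a b) :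
    a.take k = b.take k := by
  have h1 : a.take k = (a.take (pvLcp a b)).take k := by
    rw [List.take_take, Nat.min_eq_left hk]
  have h2 : b.take k = (b.take (pvLcp a b)).take k := by
    rw [List.take_take, Nat.min_eq_left hk]
  rw [h1, h2, pvLcp_take a b]
theorem pvLcp_ne (a : List Char) : ∀ b : List Char, ∀ (h1 : pvLcp a b < a.length) (h2 : pvLcp a b < b.length),
    a[pvLcp a b] ≠ b[pvLcp a b] := by
  induction a with
  | nil => intro b h1 h2; simp at h1
  | cons x as ih => intro b; cases b with
    | nil => intro h1 h2; simp at h2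
    | cons y bs =>
      by_cases h : x = y
      · simp [pvLcp, h]; intro h1 h2; exact ih bs h1 h2
      · simp [pvLcp, h]
theorem ordCmp_append (p : List Char) (u v : List Char) :
    ordCmp (p ++ u) (p ++ v) = ordCmp u v := by
  induction p with
  | nil => rfl
  | cons a p ih => simp [ordCmp, ih]

theorem ordCmp_heads (a b : Char) (u v : List Char) (hne : a ≠ b) :
    ordCmp (a :: u) (b :: v) = if a < b then -1 else 1 := by
  by_cases hlt : a < b
  · simp [ordCmp, hlt]
  · have hgt : b < a := (lt_or_gt_of_ne hne).resolve_left hlt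
    simp [ordCmp, hlt, hgt]

theorem ordCmp_strip (u v : List Char) (k : Nat) (h : u.take k = v.take k) :
    ordCmp u v = ordCmp (u.drop k) (v.drop k) := by
  calc ordCmp u v = ordCmp (u.take k ++ u.drop k) (v.take k ++ v.drop k) := by
        rw [List.take_append_drop, List.take_append_drop]
    _ = ordCmp (u.drop k) (v.drop k) := by rw [h]; exact ordCmp_append _ _ _

theorem pvCmpDel_eq (x y : List Char) (i : Nat) (hi : i < x.length) :
    pvCmpDel x y (pvLcp x y) (pvLcp (x.drop (i+1)) (y.drop i)) i = ordCmp (x.eraseIdx i) y := by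
  have e1 : x.eraseIdx i = x.take i ++ x.drop (i+1) := List.eraseIdx_eq_take_drop_succ x i
  by_cases hiL : i ≤ pvLcp x y
  · -- deletion inside the common prefix
    have e3 : x.take i = y.take i := pvLcp_take_of_le x y i hiL
    have etake : (x.eraseIdx i).take i = y.take i := by
      rw [e1, List.take_append_of_le_length (by rw [List.length_take]; omega),
          List.take_take, Nat.min_self, e3]
    have edrop : (x.eraseIdx i).drop i = x.drop (i+1) := by
      rw [e1, List.drop_append_of_le_length (by rw [List.length_take]; omega),
          List.drop_take, Nat.sub_self, List.take_zero, List.nil_append]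
    have step1 : ordCmp (x.eraseIdx i) y = ordCmp (x.drop (i+1)) (y.drop i) := by
      rw [ordCmp_strip (x.eraseIdx i) y i (by rw [etake]), edrop]
    have e4 : (x.drop (i+1)).take (pvLcp (x.drop (i+1)) (y.drop i))
        = (y.drop i).take (pvLcp (x.drop (i+1)) (y.drop i)) :=
      pvLcp_take (x.drop (i+1)) (y.drop i)
    have step2 : ordCmp (x.drop (i+1)) (y.drop i)
        = ordCmp (x.drop (i+1+(pvLcp (x.drop (i+1)) (y.drop i))))
                 (y.drop (i+(pvLcp (x.drop (i+1)) (y.drop i)))) := by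
      rw [ordCmp_strip _ _ _ e4, List.drop_drop, List.drop_drop]
    rw [step1, step2]
    by_cases hp : x.length ≤ i + 1 + pvLcp (x.drop (i+1)) (y.drop i)
    · by_cases hq : y.length ≤ i + pvLcp (x.drop (i+1)) (y.drop i)
      · have dx : x.drop (i+1+(pvLcp (x.drop (i+1)) (y.drop i))) = [] := List.drop_eq_nil_iff.mpr hp
        have dy : y.drop (i+(pvLcp (x.drop (i+1)) (y.drop i))) = [] := List.drop_eq_nil_iff.mpr hq
        rw [dx, dy]
        simp [pvCmpDel, hiL, hp, hq, ordCmp]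
      · have dx : x.drop (i+1+(pvLcp (x.drop (i+1)) (y.drop i))) = [] := List.drop_eq_nil_iff.mpr hp
        have hq' : i + pvLcp (x.drop (i+1)) (y.drop i) < y.length := not_le.mp hq
        rw [dx, List.drop_eq_getElem_cons hq']
        simp [pvCmpDel, hiL, hp, hq, ordCmp]
    · have hp' : i + 1 + pvLcp (x.drop (i+1)) (y.drop i) < x.length := not_le.mp hp
      by_cases hq : y.length ≤ i + pvLcp (x.drop (i+1)) (y.drop i)
      · have dy : y.drop (i+(pvLcp (x.drop (i+1)) (y.drop i))) = [] := List.drop_eq_nil_iff.mpr hq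
        rw [dy, List.drop_eq_getElem_cons hp']
        simp [pvCmpDel, hiL, hp, hq, ordCmp]
      · have hq' : i + pvLcp (x.drop (i+1)) (y.drop i) < y.length := not_le.mp hq
        have hku : pvLcp (x.drop (i+1)) (y.drop i) < (x.drop (i+1)).length := by
          rw [List.length_drop]; omega
        have hkv : pvLcp (x.drop (i+1)) (y.drop i) < (y.drop i).length := by
          rw [List.length_drop]; omega
        have hne := pvLcp_ne (x.drop (i+1)) (y.drop i) hku hkv
        rw [List.getElem_drop, List.getElem_drop] at hne
        have hne' : x[i + 1 + pvLcp (x.drop (i+1)) (y.drop i)]'(by omega) ≠ y[i + pvLcp (x.drop (i+1)) (y.drop i)]'(by omega) := by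
          convert hne using 2
        rw [List.drop_eq_getElem_cons hp', List.drop_eq_getElem_cons hq',
            ordCmp_heads _ _ _ _ hne']
        simp [pvCmpDel, hiL, hp, hq, List.getElem?_eq_getElem hp', List.getElem?_eq_getElem hq']
  · -- deletion after the first mismatch
    have hLi : pvLcp x y < i := not_le.mp hiL
    have hLn : pvLcp x y < x.length := lt_trans hLi hi
    have etake : (x.eraseIdx i).take (pvLcp x y) = x.take (pvLcp x y) := by
      rw [e1, List.take_append_of_le_length (by rw [List.length_take]; omega),
          List.take_take, Nat.min_eq_left (by omega)]
    have hlen : (x.eraseIdx i).length = x.length - 1 := List.length_eraseIdx_of_lt hi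
    have hdlt : pvLcp x y < (x.eraseIdx i).length := by omega
    by_cases hm : y.length ≤ pvLcp x y
    · -- y is a proper prefix of the erased string: result 1
      have hLm : pvLcp x y = y.length := le_antisymm (pvLcp_le_right x y) hm
      have hy : y = x.take (pvLcp x y) := by
        rw [pvLcp_take x y, hLm, List.take_length]
      have hyt : y.take (pvLcp x y) = y := List.take_of_length_le hm
      have step : ordCmp (x.eraseIdx i) y = ordCmp ((x.eraseIdx i).drop (pvLcp x y)) [] := by
        rw [ordCmp_strip (x.eraseIdx i) y (pvLcp x y) (by rw [etake, hyt, ← hy]),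
            List.drop_eq_nil_iff.mpr (le_of_eq hLm.symm)]
      rw [step]
      rcases hE : (x.eraseIdx i).drop (pvLcp x y) with _ | ⟨c, cs⟩
      · exfalso
        rw [List.drop_eq_nil_iff] at hE
        omega
      · simp [pvCmpDel, hiL, hm, ordCmp]
    · have hLm : pvLcp x y < y.length := not_le.mp hm
      have hne := pvLcp_ne x y hLn hLm
      have eget : (x.eraseIdx i)[pvLcp x y]'hdlt = x[pvLcp x y]'hLn :=
        List.getElem_eraseIdx_of_lt hdlt hLi
      have etake2 : (x.eraseIdx i).take (pvLcp x y) = y.take (pvLcp x y) := by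
        rw [etake]; exact pvLcp_take_of_le x y _ (le_refl _)
      have step : ordCmp (x.eraseIdx i) y
          = ordCmp ((x.eraseIdx i).drop (pvLcp x y)) (y.drop (pvLcp x y)) :=
        ordCmp_strip _ _ _ etake2
      rw [step, List.drop_eq_getElem_cons hdlt, List.drop_eq_getElem_cons hLm]
      have hne' : (x.eraseIdx i)[pvLcp x y]'hdlt ≠ y[pvLcp x y] := by rw [eget]; exact hne
      rw [ordCmp_heads _ _ _ _ hne']
      simp [pvCmpDel, hiL, hm, eget, List.getElem?_eq_getElem hLn, List.getElem?_eq_getElem hLm]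

theorem pvSuf_getD (x : List Char) : ∀ (y : List Char) (i : Nat),
    (pvSuf x y).getD i 0 = pvLcp (x.drop (i+1)) (y.drop i) := by
  induction x with
  | nil =>
    intro y i
    have : pvLcp [] (y.drop i) = 0 := by cases y.drop i <;> simp [pvLcp]
    simp [pvSuf, this]
  | cons a as ih =>
    intro y i
    cases i with
    | zero =>
      simp only [pvSuf, List.getD_cons_zero, List.drop_succ_cons, List.drop_zero]
      cases as with
      | nil => cases y <;> simp [pvLcp]
      | cons b as' =>
        cases y with
        | nil => simp [pvLcp]
        | cons c y' =>
          by_cases h : b = c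
          · subst h
            have h2 := ih y' 0
            simp only [List.drop_succ_cons, List.drop_zero] at h2
            have h3 : ∀ l : List Nat, l.headD 0 = l.getD 0 0 := by
              intro l; cases l <;> rfl
            have h5 : pvLcp (b :: as') (b :: y') = pvLcp as' y' + 1 := by simp [pvLcp]
            show (if b = b then (pvSuf (b :: as') y').headD 0 + 1 else 0) = pvLcp (b :: as') (b :: y')
            rw [if_pos rfl, h3, h2, h5]
          · simp [pvLcp, h]
    | succ i =>
      simp only [pvSuf, List.getD_cons_succ]
      rw [ih y.tail i]
      rw [List.drop_succ_cons, ← List.drop_one, List.drop_drop, Nat.add_comm 1 i]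

theorem enumerate_eq_map (x : List Char) : ∀ s : Int,
    PySem.List.enumerate x s = (List.range x.length).map (fun (j : Nat) => (s + (j : Int), x.getD j ' ')) := by
  induction x with
  | nil => intro s; simp [PySem.List.enumerate_nil]
  | cons a as ih =>
    intro s
    rw [PySem.List.enumerate_cons, ih (s+1)]
    rw [List.length_cons, List.range_succ_eq_map, List.map_cons, List.map_map]
    refine List.cons_eq_cons.mpr ⟨by simp, ?_⟩
    apply List.map_congr_left
    intro j _
    simp only [Function.comp_apply, List.getD_cons_succ, Prod.mk.injEq]
    refine ⟨by push_cast; ring, trivial⟩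

theorem loop_lt_eq (x y : List Char) (z : Int) :
    ((PySem.List.enumerate x 0).foldl (fun counter ic =>
      if ic.2.toNat < 97 then
        match PySem.List.pop? x ic.1 with
        | some (_, rest) => if rest < y then counter + 1 else counter
        | none => counter
      else counter) z) = z + pvCountDel x y (-1) := by
  rw [enumerate_eq_map x 0, List.foldl_map]
  have h1 : ∀ (acc : Int), ∀ j ∈ List.range x.length,
      (if (x.getD j ' ').toNat < 97 then
        match PySem.List.pop? x ((0 : Int) + (j : Int), x.getD j ' ').1 with
        | some (_, rest) => if rest < y then acc + 1 else acc
        | none => acc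
      else acc)
      = acc + (if (x.getD j ' ').toNat < 97 ∧ pvCmpDel x y (pvLcp x y) ((pvSuf x y).getD j 0) j = -1 then 1 else 0) := by
    intro acc j hj
    rw [List.mem_range] at hj
    simp only [zero_add]
    rw [PySem.List.pop?_natCast x j hj, pvSuf_getD x y j, pvCmpDel_eq x y j hj,
        List.getD_eq_getElem x ' ' hj]
    by_cases hc : (x[j]'hj).toNat < 97
    · by_cases hcmp : x.eraseIdx j < y
      · simp [hc, hcmp, (ordCmp_eq_neg_one_iff _ _).mpr hcmp]
      · have hne : ordCmp (x.eraseIdx j) y ≠ -1 := fun h => hcmp ((ordCmp_eq_neg_one_iff _ _).mp h)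
        simp [hc, hcmp, hne]
    · simp [hc]
  rw [PySem.List.foldl_congr_mem _ _ _ z h1, PySem.List.foldl_add]
  unfold pvCountDel
  have h2 : ∀ (acc : Int), ∀ j ∈ List.range x.length,
      (if (x.getD j ' ').toNat < 97 ∧ pvCmpDel x y (pvLcp x y) ((pvSuf x y).getD j 0) j = -1 then acc + 1 else acc)
      = acc + (if (x.getD j ' ').toNat < 97 ∧ pvCmpDel x y (pvLcp x y) ((pvSuf x y).getD j 0) j = -1 then 1 else 0) := by
    intro acc j _
    split_ifs <;> omega
  rw [PySem.List.foldl_congr_mem _ _ _ 0 h2, PySem.List.foldl_add]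
  omega

theorem loop_gt_eq (x y : List Char) (z : Int) :
    ((PySem.List.enumerate x 0).foldl (fun counter ic =>
      if ic.2.toNat < 97 then
        match PySem.List.pop? x ic.1 with
        | some (_, rest) => if y < rest then counter + 1 else counter
        | none => counter
      else counter) z) = z + pvCountDel x y 1 := by
  rw [enumerate_eq_map x 0, List.foldl_map]
  have h1 : ∀ (acc : Int), ∀ j ∈ List.range x.length,
      (if (x.getD j ' ').toNat < 97 then
        match PySem.List.pop? x ((0 : Int) + (j : Int), x.getD j ' ').1 with
        | some (_, rest) => if y < rest then acc + 1 else acc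
        | none => acc
      else acc)
      = acc + (if (x.getD j ' ').toNat < 97 ∧ pvCmpDel x y (pvLcp x y) ((pvSuf x y).getD j 0) j = 1 then 1 else 0) := by
    intro acc j hj
    rw [List.mem_range] at hj
    simp only [zero_add]
    rw [PySem.List.pop?_natCast x j hj, pvSuf_getD x y j, pvCmpDel_eq x y j hj,
        List.getD_eq_getElem x ' ' hj]
    by_cases hc : (x[j]'hj).toNat < 97
    · by_cases hcmp : y < x.eraseIdx j
      · simp [hc, hcmp, (ordCmp_eq_one_iff _ _).mpr hcmp]
      · have hne : ordCmp (x.eraseIdx j) y ≠ 1 := fun h => hcmp ((ordCmp_eq_one_iff _ _).mp h)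
        simp [hc, hcmp, hne]
    · simp [hc]
  rw [PySem.List.foldl_congr_mem _ _ _ z h1, PySem.List.foldl_add]
  unfold pvCountDel
  have h2 : ∀ (acc : Int), ∀ j ∈ List.range x.length,
      (if (x.getD j ' ').toNat < 97 ∧ pvCmpDel x y (pvLcp x y) ((pvSuf x y).getD j 0) j = 1 then acc + 1 else acc)
      = acc + (if (x.getD j ' ').toNat < 97 ∧ pvCmpDel x y (pvLcp x y) ((pvSuf x y).getD j 0) j = 1 then 1 else 0) := by
    intro acc j _
    split_ifs <;> omega
  rw [PySem.List.foldl_congr_mem _ _ _ 0 h2, PySem.List.foldl_add]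
  omega

-- ===== VERDICT (by name: the statement is the Claim_ definition above) =====
theorem removeOneDigit_spec : Claim_equal_removeOneDigit := by
  intro s t _
  unfold Spec_removeOneDigit
  show removeOneDigit s t = removeOneDigit_alt s t
  unfold removeOneDigit removeOneDigit_alt
  simp only []
  rw [loop_lt_eq s.toList t.toList 0, loop_gt_eq t.toList s.toList _]
  omega
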